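-- pv_equiv track=rewrite | github.com/Vicfred/kyopro | atcoder/abc197C_orxor.py | calc
-- ===== SOURCE A (Python) =====
-- def calc(a, b):
--     or_ = None
--     res = None
--     for i in range(len(a)):
--         if or_ is None:
--             or_ = a[i]
--         else:
--             or_ |= a[i]
--         if (1<<i) & b:
--             if res is None:
--                 res = or_
--             else:
--                 res ^= or_
--             or_ = None
--     if res is None:
--         res = or_
--     else:
--         res ^= or_
--     return res
-- ===== SOURCE B (Python) =====
-- def calc(a, b):
--     # Recursive decomposition: find the first cut position (lowest set bit of b
--     # within range), OR the prefix up to it, and recurse on the remaining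
--     # suffix with b shifted past the cut.
--     for j in range(len(a)):
--         if (b >> j) & 1:
--             seg = 0
--             for x in a[:j + 1]:
--                 seg |= x
--             return seg ^ calc(a[j + 1:], b >> (j + 1))
--     t = 0
--     for x in a:
--         t |= x
--     return t
-- ===== Notes on version B (the rewrite author's own statement) =====
-- stated objective: alternative
-- what changed: Replaces A's single left-to-right scan that threads two None-sentinel accumulators (running OR, running XOR) by a recursive divide-at-the-first-cut algorithm: locate the first set bit of b, OR the prefix slice up to it, and recurse on the suffix with b shifted past the cut; per-element Python-level branch work on (1<<i)&b disappears (one slice-OR loop per segment, one bit test per set bit of b).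
-- outside the precondition, e.g. on calc([], 0): A returns None, B returns 0
import Mathlib
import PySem

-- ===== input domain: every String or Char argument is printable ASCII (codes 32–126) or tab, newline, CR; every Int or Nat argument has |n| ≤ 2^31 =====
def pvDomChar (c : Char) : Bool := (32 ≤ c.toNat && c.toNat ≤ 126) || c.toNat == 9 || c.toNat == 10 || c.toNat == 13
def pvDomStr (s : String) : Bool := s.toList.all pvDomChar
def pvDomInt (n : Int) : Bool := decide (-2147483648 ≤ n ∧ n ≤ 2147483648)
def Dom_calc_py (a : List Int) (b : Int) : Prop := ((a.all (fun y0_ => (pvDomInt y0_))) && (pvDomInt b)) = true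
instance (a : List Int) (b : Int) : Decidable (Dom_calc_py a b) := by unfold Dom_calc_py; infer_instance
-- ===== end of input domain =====

-- B replaces A's single left-to-right scan with two running accumulators by a recursive
-- divide-at-the-first-cut algorithm (find the first set bit of b, OR that prefix, recurse
-- on the suffix with b shifted); objective: alternative.

-- ===== PORT A =====
-- Literal port of A: one loop over range(len(a)) carrying the two None-sentinel
-- accumulators (or_, res) as Options.
def calc_py (a : List Int) (b : Int) : Int :=
  let st := (List.range a.length).foldl
    (fun (st : Option Int × Option Int) (i : Nat) =>
      let x := a.getD i 0   -- a[i]; i < len(a), always in range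
      let o : Int := match st.1 with
        | none => x                       -- or_ = a[i]
        | some v => PySem.Int.bor v x     -- or_ |= a[i]
      if PySem.Int.band ((1 : Int) <<< i) b ≠ 0 then   -- (1<<i) & b
        (none, some (match st.2 with
          | none => o                     -- res = or_
          | some r => PySem.Int.bxor r o))  -- res ^= or_
      else (some o, st.2))
    (none, none)
  match st.2, st.1 with
  | none, o => o.getD 0                      -- res = or_; Python returns None here when a = [] (excluded by Pre_)
  | some r, o => PySem.Int.bxor r (o.getD 0) -- res ^= or_; Python raises TypeError when or_ is None (excluded by Pre_)

-- ===== PORT B =====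
-- Literal port of B: search for the first cut position j (first j with (b>>j)&1 truthy),
-- OR the prefix a[:j+1], recurse on a[j+1:] with b >> (j+1); if no cut, OR the whole list.
def calc_py_alt (a : List Int) (b : Int) : Int :=
  match h : (List.range a.length).find? (fun (j : Nat) => decide (PySem.Int.band (b >>> j) 1 ≠ 0)) with
  | some j =>
      let seg := (PySem.List.slice a none (some ((j : Int) + 1))).foldl
        (fun s x => PySem.Int.bor s x) 0                                 -- seg |= x over a[:j+1]
      PySem.Int.bxor seg
        (calc_py_alt (PySem.List.slice a (some ((j : Int) + 1)) none) (b >>> (j + 1)))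
  | none => a.foldl (fun t x => PySem.Int.bor t x) 0                      -- t |= x over a
termination_by a.length
decreasing_by
  have hj : j < a.length := List.mem_range.mp (List.mem_of_find?_eq_some h)
  have hc : ((j : Int) + 1) = (((j + 1 : Nat) : Int)) := by push_cast; ring
  rw [hc, PySem.List.slice_from_natCast]
  simp only [List.length_drop]
  omega

-- ===== PRECONDITION & SPEC =====
-- Pre_ excludes a = [] (A returns None, not an int) and inputs whose bit len(a)-1 of b
-- is set (A ends with or_ = None and 'res ^= None' raises TypeError).
def Pre_calc_py (a : List Int) (b : Int) : Prop :=
  a ≠ [] ∧ PySem.Int.band ((1 : Int) <<< (a.length - 1)) b = 0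
instance (a : List Int) (b : Int) : Decidable (Pre_calc_py a b) := by unfold Pre_calc_py; infer_instance
def pvWitness_calc_py : List Int × Int := ([1, 2, 3], 2)

def Spec_calc_py (a : List Int) (b : Int) (out : Int) : Prop := out = calc_py_alt a b
instance (a : List Int) (b : Int) (out : Int) : Decidable (Spec_calc_py a b out) := by unfold Spec_calc_py; infer_instance

-- ===== CLAIM (what is proved, stated in full; the proofs are below) =====
def Claim_equal_calc_py : Prop := ∀ (a : List Int) (b : Int), Dom_calc_py a b → Pre_calc_py a b → Spec_calc_py a b (calc_py a b)

-- ===== LEMMAS AND PROOFS =====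

-- two's-complement encoding: pvEnc false n = n, pvEnc true n = -n-1
def pvEnc (s : Bool) (n : Nat) : Int := if s then -(n : Int) - 1 else (n : Int)

theorem pvEnc_surj (x : Int) : ∃ s n, x = pvEnc s n := by
  cases x with
  | ofNat n => exact ⟨false, n, rfl⟩
  | negSucc n => exact ⟨true, n, by simp [pvEnc, Int.negSucc_eq]; ring⟩

theorem pvBxor_enc (s1 s2 : Bool) (n1 n2 : Nat) :
    PySem.Int.bxor (pvEnc s1 n1) (pvEnc s2 n2) = pvEnc (xor s1 s2) (n1 ^^^ n2) := by
  cases s1 <;> cases s2 <;>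
    simp [pvEnc, PySem.Int.bxor] <;> omega

theorem pvBxor_assoc (a b c : Int) :
    PySem.Int.bxor (PySem.Int.bxor a b) c = PySem.Int.bxor a (PySem.Int.bxor b c) := by
  obtain ⟨s1, n1, rfl⟩ := pvEnc_surj a
  obtain ⟨s2, n2, rfl⟩ := pvEnc_surj b
  obtain ⟨s3, n3, rfl⟩ := pvEnc_surj c
  rw [pvBxor_enc, pvBxor_enc, pvBxor_enc, pvBxor_enc, Bool.xor_assoc, Nat.xor_assoc]

theorem pvBor_zero_left (x : Int) : PySem.Int.bor 0 x = x := by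
  rw [PySem.Int.bor_comm]; exact PySem.Int.bor_zero x

-- bit i of b, read as Python does it on either side: (1<<i)&b vs (b>>i)&1
theorem pvBandNegSucc (m i : Nat) :
    PySem.Int.band ((((2:Nat) ^ i : Nat) : Int)) (Int.negSucc m)
      = ((2 ^ i - (2 ^ i &&& m) : Nat) : Int) := by
  rw [PySem.Int.band]
  have hneg : ¬(0 ≤ Int.negSucc m) := not_le.mpr (Int.negSucc_lt_zero m)
  rw [if_pos (by positivity : (0:Int) ≤ ((2^i : Nat) : Int)), if_neg hneg]
  have h1 : (-(Int.negSucc m) - 1) = (m : Int) := by rw [Int.negSucc_eq]; ring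
  rw [h1]
  simp only [Int.toNat_natCast]

theorem pvBandOne (k : Nat) : PySem.Int.band (Int.negSucc k) 1 = ((1 - (1 &&& k) : Nat) : Int) := by
  rw [PySem.Int.band]
  have hneg : ¬(0 ≤ Int.negSucc k) := not_le.mpr (Int.negSucc_lt_zero k)
  rw [if_neg hneg, if_pos (by norm_num : (0:Int) ≤ (1:Int))]
  have h1 : (-(Int.negSucc k) - 1) = (k : Int) := by rw [Int.negSucc_eq]; ring
  rw [h1]
  simp only [Int.toNat_natCast, Int.toNat_one]

theorem pvBit (b : Int) (i : Nat) :
    (PySem.Int.band ((1 : Int) <<< i) b ≠ 0) ↔ (PySem.Int.band (b >>> i) 1 ≠ 0) := by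
  have hpow : ((1 : Int) <<< i) = (((2 ^ i : Nat) : Int)) := by
    rw [Int.shiftLeft_eq]; push_cast; ring
  have hp : 0 < 2 ^ i := Nat.two_pow_pos i
  cases b with
  | ofNat m =>
    have hsr : (Int.ofNat m) >>> i = ((m >>> i : Nat) : Int) := rfl
    rw [hpow, hsr, show (Int.ofNat m) = ((m : Nat) : Int) from rfl,
      show (1 : Int) = (((1 : Nat) : Int)) from rfl,
      PySem.Int.band_natCast, PySem.Int.band_natCast]
    have h1 : (2 ^ i) &&& m = m &&& 2 ^ i := Nat.and_comm _ _
    have h2 : (m >>> i) &&& 1 = (m >>> i) % 2 := Nat.and_one_is_mod _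
    rw [h1, Nat.and_two_pow, h2]
    have h3 : m.testBit i = ((m >>> i) % 2 == 1) := by
      rw [Nat.testBit, Nat.and_comm, Nat.and_one_is_mod]
      rcases Nat.mod_two_eq_zero_or_one (m >>> i) with h | h <;> simp [h]
    rw [h3]
    rcases Nat.mod_two_eq_zero_or_one (m >>> i) with h | h <;> simp [h]
  | negSucc m =>
    have hsr : (Int.negSucc m) >>> i = Int.negSucc (m >>> i) := rfl
    rw [hpow, hsr, pvBandNegSucc, pvBandOne]
    have hand : (2 ^ i) &&& m = m &&& 2 ^ i := Nat.and_comm _ _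
    rw [hand, Nat.and_two_pow]
    rw [Nat.and_comm 1 (m >>> i), Nat.and_one_is_mod]
    have h3 : m.testBit i = ((m >>> i) % 2 == 1) := by
      rw [Nat.testBit, Nat.and_comm, Nat.and_one_is_mod]
      rcases Nat.mod_two_eq_zero_or_one (m >>> i) with h | h <;> simp [h]
    rcases Nat.mod_two_eq_zero_or_one (m >>> i) with h | h <;>
      simp [h3, h]

-- A's loop, restructured as structural recursion that shifts b (proof helper)
def aStep (st : Option Int × Option Int) (x : Int) (cut : Bool) : Option Int × Option Int :=
  let o : Int := match st.1 with
    | none => x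
    | some v => PySem.Int.bor v x
  if cut then (none, some (match st.2 with
    | none => o
    | some r => PySem.Int.bxor r o))
  else (some o, st.2)

def aFold : List Int → Int → Option Int × Option Int → Option Int × Option Int
  | [], _, st => st
  | x :: t, b, st => aFold t (b >>> (1 : Nat)) (aStep st x (decide (PySem.Int.band b 1 ≠ 0)))

def aFinish (st : Option Int × Option Int) : Int :=
  match st.2 with
  | none => st.1.getD 0
  | some r => PySem.Int.bxor r (st.1.getD 0)

theorem aStep_true (st : Option Int × Option Int) (x : Int) :
    aStep st x true
      = (none, some (match st.2 with
          | none => (match st.1 with | none => x | some v => PySem.Int.bor v x)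
          | some r => PySem.Int.bxor r (match st.1 with | none => x | some v => PySem.Int.bor v x))) := rfl

theorem aStep_false (st : Option Int × Option Int) (x : Int) :
    aStep st x false
      = (some (match st.1 with | none => x | some v => PySem.Int.bor v x), st.2) := rfl

-- running OR accumulator, as A maintains it
def orFrom : Option Int → List Int → Option Int
  | o, [] => o
  | o, x :: t => orFrom (some (match o with | none => x | some v => PySem.Int.bor v x)) t

theorem orFrom_some (t : List Int) : ∀ (v : Int),
    orFrom (some v) t = some (t.foldl (fun s x => PySem.Int.bor s x) v) := by
  induction t with
  | nil => intro v; rfl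
  | cons x t ih => intro v; simp only [orFrom, List.foldl_cons]; exact ih _

theorem orFrom_none_getD (t : List Int) :
    (orFrom none t).getD 0 = t.foldl (fun s x => PySem.Int.bor s x) 0 := by
  cases t with
  | nil => rfl
  | cons x t =>
    simp only [orFrom, List.foldl_cons, orFrom_some, Option.getD_some, pvBor_zero_left]

-- range-index fold = fold over the enumerated list (offset k)
theorem foldl_range'_getD_eq_enumerate {σ : Type} (F : σ → Nat → Int → σ) :
    ∀ (xs : List Int) (k : Nat) (init : σ),
      (List.range' k xs.length).foldl (fun st i => F st i (xs.getD (i - k) 0)) init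
        = (PySem.List.enumerate xs (k : Int)).foldl (fun st p => F st p.1.toNat p.2) init := by
  intro xs
  induction xs with
  | nil => intro k init; simp [PySem.List.enumerate]
  | cons x t ih =>
    intro k init
    rw [PySem.List.enumerate_cons]
    simp only [List.length_cons, List.range'_succ, List.foldl_cons]
    have hx : (x :: t).getD (k - k) 0 = x := by simp
    rw [hx]
    have hcast : ((k : Int)).toNat = k := by simp
    rw [hcast]
    have hcongr :
        (List.range' (k+1) t.length).foldl
            (fun st i => F st i ((x :: t).getD (i - k) 0)) (F init k x)
          = (List.range' (k+1) t.length).foldl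
            (fun st i => F st i (t.getD (i - (k+1)) 0)) (F init k x) := by
      apply PySem.List.foldl_congr_mem
      intro acc i hi
      have hk : k + 1 ≤ i := (List.mem_range'_1.mp hi).1
      have h1 : i - k = (i - (k + 1)) + 1 := by omega
      rw [h1]; simp
    rw [hcongr, ih (k+1) (F init k x)]
    norm_num

-- enumerated fold with A's absolute-bit test = aFold with b pre-shifted
theorem enumFold_eq_aFold (b : Int) :
    ∀ (t : List Int) (k : Nat) (st : Option Int × Option Int),
      (PySem.List.enumerate t (k : Int)).foldl
        (fun (st : Option Int × Option Int) (p : Int × Int) =>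
          let x := p.2
          let o : Int := match st.1 with
            | none => x
            | some v => PySem.Int.bor v x
          if PySem.Int.band ((1 : Int) <<< p.1.toNat) b ≠ 0 then
            (none, some (match st.2 with
              | none => o
              | some r => PySem.Int.bxor r o))
          else (some o, st.2)) st
        = aFold t (b >>> k) st := by
  intro t
  induction t with
  | nil => intro k st; simp [PySem.List.enumerate, aFold]
  | cons x t ih =>
    intro k st
    rw [PySem.List.enumerate_cons]
    simp only [List.foldl_cons, aFold]
    have hcast : ((k : Int)).toNat = k := by simp
    have hstep :
        (let o : Int := match st.1 with
          | none => x
          | some v => PySem.Int.bor v x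
        if PySem.Int.band ((1 : Int) <<< ((k : Int)).toNat) b ≠ 0 then
          ((none : Option Int), some (match st.2 with
            | none => o
            | some r => PySem.Int.bxor r o))
        else (some o, st.2))
        = aStep st x (decide (PySem.Int.band (b >>> k) 1 ≠ 0)) := by
      rw [hcast]
      unfold aStep
      by_cases hbit : PySem.Int.band ((1 : Int) <<< k) b ≠ 0
      · have := (pvBit b k).mp hbit
        simp [hbit, this]
      · have := fun h => hbit ((pvBit b k).mpr h)
        have h2 : ¬ PySem.Int.band (b >>> k) 1 ≠ 0 := fun h => this h
        simp [hbit, h2]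
    rw [hstep]
    have := ih (k + 1) (aStep st x (decide (PySem.Int.band (b >>> k) 1 ≠ 0)))
    rw [show ((k : Int) + 1) = (((k + 1 : Nat) : Int)) from by push_cast; ring, this,
      Int.shiftRight_add]

-- A's port computes aFinish ∘ aFold
theorem calc_py_eq_aFold (a : List Int) (b : Int) :
    calc_py a b = aFinish (aFold a b (none, none)) := by
  unfold calc_py
  have hconv :
      (List.range a.length).foldl
        (fun (st : Option Int × Option Int) (i : Nat) =>
          let x := a.getD i 0
          let o : Int := match st.1 with
            | none => x
            | some v => PySem.Int.bor v x
          if PySem.Int.band ((1 : Int) <<< i) b ≠ 0 then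
            (none, some (match st.2 with
              | none => o
              | some r => PySem.Int.bxor r o))
          else (some o, st.2))
        (none, none)
      = (PySem.List.enumerate a 0).foldl
        (fun (st : Option Int × Option Int) (p : Int × Int) =>
          let x := p.2
          let o : Int := match st.1 with
            | none => x
            | some v => PySem.Int.bor v x
          if PySem.Int.band ((1 : Int) <<< p.1.toNat) b ≠ 0 then
            (none, some (match st.2 with
              | none => o
              | some r => PySem.Int.bxor r o))
          else (some o, st.2))
        (none, none) := by
    have := foldl_range'_getD_eq_enumerate
      (F := fun (st : Option Int × Option Int) (i : Nat) (x : Int) =>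
        let o : Int := match st.1 with
          | none => x
          | some v => PySem.Int.bor v x
        if PySem.Int.band ((1 : Int) <<< i) b ≠ 0 then
          (none, some (match st.2 with
            | none => o
            | some r => PySem.Int.bxor r o))
        else (some o, st.2))
      a 0 (none, none)
    rw [List.range_eq_range']
    exact this
  rw [hconv]
  have h2 := enumFold_eq_aFold b a 0 (none, none)
  rw [Int.shiftRight_zero] at h2
  rw [show ((0 : Nat) : Int) = (0 : Int) from rfl] at h2
  rw [h2]
  rcases h : aFold a b (none, none) with ⟨o, r⟩
  cases r <;> simp [aFinish]

-- if no bit of b below t.length is set, the loop only accumulates the OR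
theorem aFold_no_cut : ∀ (t : List Int) (b : Int) (o : Option Int) (r : Option Int),
    (∀ j, j < t.length → PySem.Int.band (b >>> j) 1 = 0) →
    aFold t b (o, r) = (orFrom o t, r) := by
  intro t
  induction t with
  | nil => intro b o r _; rfl
  | cons x t ih =>
    intro b o r h
    have h0 : PySem.Int.band b 1 = 0 := by
      have := h 0 (by simp)
      rwa [Int.shiftRight_zero] at this
    have hd : decide (PySem.Int.band b 1 ≠ 0) = false := by simp [h0]
    simp only [aFold, hd, aStep_false, orFrom]
    apply ih
    intro j hj
    have := h (j + 1) (by simpa using Nat.succ_lt_succ hj)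
    rwa [show j + 1 = 1 + j from by omega, Int.shiftRight_add] at this

-- splitting the loop at a list split point
theorem aFold_append : ∀ (l1 l2 : List Int) (b : Int) (st : Option Int × Option Int),
    aFold (l1 ++ l2) b st = aFold l2 (b >>> l1.length) (aFold l1 b st) := by
  intro l1
  induction l1 with
  | nil => intro l2 b st; simp [aFold, Int.shiftRight_zero]
  | cons x t ih =>
    intro l2 b st
    simp only [List.cons_append, aFold, List.length_cons]
    rw [ih]
    congr 1
    rw [show t.length + 1 = 1 + t.length from by omega, Int.shiftRight_add]

-- once res is some, it stays some
theorem aFold_res_some : ∀ (l : List Int) (b : Int) (o : Option Int) (r : Int),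
    ∃ v, (aFold l b (o, some r)).2 = some v := by
  intro l
  induction l with
  | nil => intro b o r; exact ⟨r, rfl⟩
  | cons x t ih =>
    intro b o r
    cases hd : decide (PySem.Int.band b 1 ≠ 0) with
    | true => simp only [aFold, hd, aStep_true]; exact ih _ _ _
    | false => simp only [aFold, hd, aStep_false]; exact ih _ _ _

-- pulling a pre-xored constant R out of the res accumulator
theorem aFold_res_xor : ∀ (l : List Int) (b : Int) (o : Option Int) (r R : Int),
    aFold l b (o, some (PySem.Int.bxor R r))
      = ((aFold l b (o, some r)).1, (aFold l b (o, some r)).2.map (fun v => PySem.Int.bxor R v)) := by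
  intro l
  induction l with
  | nil => intro b o r R; rfl
  | cons x t ih =>
    intro b o r R
    cases hd : decide (PySem.Int.band b 1 ≠ 0) with
    | true =>
      simp only [aFold, hd, aStep_true]
      have : PySem.Int.bxor (PySem.Int.bxor R r)
          (match o with | none => x | some v => PySem.Int.bor v x)
          = PySem.Int.bxor R (PySem.Int.bxor r
            (match o with | none => x | some v => PySem.Int.bor v x)) := pvBxor_assoc _ _ _
      rw [this]
      exact ih _ _ _ _
    | false =>
      simp only [aFold, hd, aStep_false]
      exact ih _ _ _ _

-- starting res = some R versus res = none
theorem aFold_res_start : ∀ (l : List Int) (b : Int) (o : Option Int) (R : Int),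
    aFold l b (o, some R)
      = ((aFold l b (o, none)).1, some (match (aFold l b (o, none)).2 with
          | none => R
          | some v => PySem.Int.bxor R v)) := by
  intro l
  induction l with
  | nil => intro b o R; rfl
  | cons x t ih =>
    intro b o R
    cases hd : decide (PySem.Int.band b 1 ≠ 0) with
    | true =>
      simp only [aFold, hd, aStep_true]
      set o' : Int := match o with | none => x | some v => PySem.Int.bor v x with ho'
      rw [aFold_res_xor t (b >>> (1 : Nat)) none o' R]
      obtain ⟨v, hv⟩ := aFold_res_some t (b >>> (1 : Nat)) none o'
      rw [hv]
      simp
    | false =>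
      simp only [aFold, hd, aStep_false]
      exact ih _ _ _

theorem aFinish_res_start (l : List Int) (b : Int) (R : Int) :
    aFinish (aFold l b (none, some R))
      = PySem.Int.bxor R (aFinish (aFold l b (none, none))) := by
  rw [aFold_res_start]
  rcases h : aFold l b (none, none) with ⟨o, r⟩
  cases r with
  | none => simp [aFinish]
  | some v => simp [aFinish, pvBxor_assoc]

-- the first cut closes the segment a[:j+1] with its OR
theorem aFold_prefix (l1 : List Int) (x : Int) (b : Int)
    (h1 : ∀ i, i < l1.length → PySem.Int.band (b >>> i) 1 = 0)
    (h2 : PySem.Int.band (b >>> l1.length) 1 ≠ 0) :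
    aFold (l1 ++ [x]) b (none, none)
      = (none, some ((l1 ++ [x]).foldl (fun s y => PySem.Int.bor s y) 0)) := by
  rw [aFold_append, aFold_no_cut l1 b none none h1]
  have hd : decide (PySem.Int.band (b >>> l1.length) 1 ≠ 0) = true := decide_eq_true h2
  simp only [aFold, hd, aStep_true]
  cases l1 with
  | nil => simp [orFrom, pvBor_zero_left]
  | cons y t =>
    simp only [orFrom, orFrom_some, List.cons_append, List.foldl_cons, List.foldl_append,
      List.foldl_nil, pvBor_zero_left]

-- main equivalence: A's restructured loop = B's recursion
theorem aFold_eq_alt (a : List Int) (b : Int) :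
    aFinish (aFold a b (none, none)) = calc_py_alt a b := by
  rcases hf : (List.range a.length).find? (fun (j : Nat) => decide (PySem.Int.band (b >>> j) 1 ≠ 0)) with _ | j
  · -- no cut anywhere: single OR segment
    rw [calc_py_alt, hf]
    have hnone := List.find?_eq_none.mp hf
    have hall : ∀ j, j < a.length → PySem.Int.band (b >>> j) 1 = 0 := by
      intro j hj
      have := hnone j (List.mem_range.mpr hj)
      simpa using this
    rw [aFold_no_cut a b none none hall]
    simp only [aFinish, orFrom_none_getD]
  · -- first cut at j
    obtain ⟨hpj, as, bs, heq, hall⟩ := List.find?_eq_some_iff_append.mp hf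
    have hpj' : PySem.Int.band (b >>> j) 1 ≠ 0 := by simpa using hpj
    have hlen : as.length < a.length := by
      have := congrArg List.length heq
      simp at this
      omega
    have hjval : j = as.length := by
      have e1 : (List.range a.length)[as.length]? = some j := by
        rw [heq, List.getElem?_append_right (le_refl as.length)]
        simp
      rw [List.getElem?_range (by simpa using hlen)] at e1
      exact (Option.some.inj e1).symm
    have hjlt : j < a.length := hjval ▸ hlen
    have hmin : ∀ i, i < j → PySem.Int.band (b >>> i) 1 = 0 := by
      intro i hi
      have hias : i ∈ as := by
        have : as = (List.range a.length).take as.length := by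
          rw [heq, List.take_left]
        rw [this, List.take_range]
        exact List.mem_range.mpr (by omega)
      have := hall i hias
      simpa using this
    -- split a at j+1
    have hsplit : a = a.take (j + 1) ++ a.drop (j + 1) := (List.take_append_drop _ _).symm
    have htake : a.take (j + 1) = a.take j ++ [a[j]'hjlt] := by
      rw [List.take_add_one]
      simp [List.getElem?_eq_getElem hjlt]
    have hlen1 : (a.take (j + 1)).length = j + 1 := by
      simp [List.length_take]
      omega
    have hlenj : (a.take j).length = j := by
      simp [List.length_take]
      omega
    -- unfold B at this input first (the only calc_py_alt occurrence is on the right)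
    rw [calc_py_alt, hf]
    change _ = PySem.Int.bxor
      ((PySem.List.slice a none (some ((j : Int) + 1))).foldl (fun s x => PySem.Int.bor s x) 0)
      (calc_py_alt (PySem.List.slice a (some ((j : Int) + 1)) none) (b >>> (j + 1)))
    have hc : ((j : Int) + 1) = (((j + 1 : Nat) : Int)) := by push_cast; ring
    rw [hc, PySem.List.slice_to_natCast, PySem.List.slice_from_natCast]
    conv_lhs => rw [hsplit]
    rw [aFold_append, hlen1]
    rw [htake, aFold_prefix (a.take j) (a[j]'hjlt) b
      (by intro i hi; exact hmin i (by rwa [hlenj] at hi))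
      (by rwa [hlenj])]
    rw [aFinish_res_start]
    rw [aFold_eq_alt (a.drop (j + 1)) (b >>> (j + 1)), ← htake]
termination_by a.length
decreasing_by
  simp only [List.length_drop]
  omega

-- ===== VERDICT (by name: the statement is the Claim_ definition above) =====
theorem calc_py_spec : Claim_equal_calc_py := by
  intro a b _ _
  unfold Spec_calc_py
  rw [calc_py_eq_aFold, aFold_eq_alt]
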